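-- pv_equiv track=rewrite | github.com/rdovgan/evm_scripts | skybreach/find_groups.py | find_new_neighbors
-- ===== SOURCE A (Python) =====
-- from collections import defaultdict, deque
--
-- def build_adjacency_list(lands):
--     """Create an adjacency list for the lands based on their coordinates."""
--     adjacency_list = defaultdict(list)
--
--     for x1, y1 in lands:
--         for x2, y2 in lands:
--             if (x1 == x2 and abs(y1 - y2) == 1) or (y1 == y2 and abs(x1 - x2) == 1):
--                 adjacency_list[(x1, y1)].append((x2, y2))
--
--     return adjacency_list
--
-- def find_new_neighbors(existing_lands, new_lands):
--     """Find new lands that are neighbors to existing lands."""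
--     adjacency_list = build_adjacency_list(existing_lands + new_lands)
--     new_groups = []
--
--     for new_land in new_lands:
--         for existing_land in existing_lands:
--             if new_land in adjacency_list[existing_land]:
--                 new_groups.append(new_land)
--                 break
--
--     return new_groups
-- ===== SOURCE B (Python) =====
-- def find_new_neighbors(existing_lands, new_lands):
--     """Find new lands that are neighbors to existing lands."""
--     frontier = set()
--     for x, y in existing_lands:
--         frontier.update(((x + 1, y), (x - 1, y), (x, y + 1), (x, y - 1)))
--     return [new_land for new_land in new_lands if new_land in frontier]
-- ===== Notes on version B (the rewrite author's own statement) =====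
-- stated objective: faster
-- what changed: Replaces the all-pairs adjacency-list build plus nested existing-land scan with a single frontier set of the four orthogonal neighbors of each existing land, so each new land is one set-membership test.
import Mathlib
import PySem

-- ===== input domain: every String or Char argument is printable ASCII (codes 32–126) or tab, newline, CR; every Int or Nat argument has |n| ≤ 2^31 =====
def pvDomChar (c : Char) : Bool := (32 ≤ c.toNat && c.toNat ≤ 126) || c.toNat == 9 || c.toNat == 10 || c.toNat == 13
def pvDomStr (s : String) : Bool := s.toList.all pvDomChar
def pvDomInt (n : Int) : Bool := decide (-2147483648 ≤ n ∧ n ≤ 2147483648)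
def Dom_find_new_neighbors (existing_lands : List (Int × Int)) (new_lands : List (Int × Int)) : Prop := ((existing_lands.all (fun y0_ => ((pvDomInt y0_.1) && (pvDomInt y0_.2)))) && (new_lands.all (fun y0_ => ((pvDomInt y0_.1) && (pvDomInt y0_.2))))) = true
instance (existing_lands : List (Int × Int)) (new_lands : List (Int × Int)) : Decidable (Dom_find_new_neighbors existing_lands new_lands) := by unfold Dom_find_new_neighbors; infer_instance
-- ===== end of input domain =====

-- B replaces the all-pairs adjacency-list build and nested scan by a precomputed frontier set
-- of the four orthogonal neighbors of each existing land (objective: faster).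

-- ===== PORT A =====
-- adjacency test '(x1 == x2 and abs(y1 - y2) == 1) or (y1 == y2 and abs(x1 - x2) == 1)'
def pvAdj (p q : Int × Int) : Bool :=
  (p.1 == q.1 && (p.2 - q.2).natAbs == 1) || (p.2 == q.2 && (p.1 - q.1).natAbs == 1)

-- 'adjacency_list[(x1, y1)].append((x2, y2))' on a defaultdict(list)
def build_adjacency_list (lands : List (Int × Int)) : PySem.Dict (Int × Int) (List (Int × Int)) :=
  lands.foldl (fun d p1 =>
    lands.foldl (fun d p2 =>
      if pvAdj p1 p2 then d.modify p1 [] (· ++ [p2]) else d) d) PySem.Dict.empty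

-- the inner 'for existing_land in existing_lands: … break' loop of A
def pvInnerScan (adj : PySem.Dict (Int × Int) (List (Int × Int))) (n : Int × Int) :
    List (Int × Int) → Bool
  | [] => false
  | e :: rest => if (adj.getD e []).contains n then true else pvInnerScan adj n rest

def find_new_neighbors (existing_lands : List (Int × Int)) (new_lands : List (Int × Int)) : List (Int × Int) :=
  let adj := build_adjacency_list (existing_lands ++ new_lands)
  new_lands.foldl (fun acc n => if pvInnerScan adj n existing_lands then acc ++ [n] else acc) []

-- ===== PORT B =====
def find_new_neighbors_alt (existing_lands : List (Int × Int)) (new_lands : List (Int × Int)) : List (Int × Int) :=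
  let frontier : PySem.Set (Int × Int) :=
    existing_lands.foldl (fun s e =>
      PySem.Set.update s [(e.1 + 1, e.2), (e.1 - 1, e.2), (e.1, e.2 + 1), (e.1, e.2 - 1)])
      PySem.Set.empty
  new_lands.filter (fun n => PySem.Set.contains frontier n)

-- ===== PRECONDITION & SPEC =====
def Spec_find_new_neighbors (existing_lands : List (Int × Int)) (new_lands : List (Int × Int)) (out : List (Int × Int)) : Prop := out = find_new_neighbors_alt existing_lands new_lands
instance (existing_lands : List (Int × Int)) (new_lands : List (Int × Int)) (out : List (Int × Int)) : Decidable (Spec_find_new_neighbors existing_lands new_lands out) := by unfold Spec_find_new_neighbors; infer_instance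

-- ===== CLAIM (what is proved, stated in full; the proofs are below) =====
def Claim_equal_find_new_neighbors : Prop := ∀ (existing_lands : List (Int × Int)) (new_lands : List (Int × Int)), Dom_find_new_neighbors existing_lands new_lands → Spec_find_new_neighbors existing_lands new_lands (find_new_neighbors existing_lands new_lands)

-- ===== LEMMAS AND PROOFS =====

-- the inner fold of build_adjacency_list: what ends up under key e
theorem pv_inner_mem (p1 : Int × Int) (l2 : List (Int × Int))
    (d : PySem.Dict (Int × Int) (List (Int × Int))) (e n : Int × Int) :
    n ∈ ((l2.foldl (fun d p2 => if pvAdj p1 p2 then d.modify p1 [] (· ++ [p2]) else d) d).getD e [])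
      ↔ n ∈ d.getD e [] ∨ (e = p1 ∧ n ∈ l2 ∧ pvAdj p1 n = true) := by
  induction l2 generalizing d with
  | nil => simp
  | cons a t ih =>
    simp only [List.foldl_cons]
    by_cases h : pvAdj p1 a = true
    · rw [if_pos h, ih, PySem.Dict.getD_modify]
      by_cases he : e = p1
      · subst he
        rw [if_pos rfl]
        simp only [List.mem_append, List.mem_cons, List.not_mem_nil, or_false, true_and]
        constructor
        · rintro ((h1 | rfl) | ⟨h2, h3⟩)
          · exact Or.inl h1
          · exact Or.inr ⟨Or.inl rfl, h⟩
          · exact Or.inr ⟨Or.inr h2, h3⟩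
        · rintro (h1 | ⟨(rfl | h2), h3⟩)
          · exact Or.inl (Or.inl h1)
          · exact Or.inl (Or.inr rfl)
          · exact Or.inr ⟨h2, h3⟩
      · rw [if_neg he]
        simp [he]
    · rw [if_neg h, ih]
      constructor
      · rintro (h1 | ⟨rfl, h2, h3⟩)
        · exact Or.inl h1
        · exact Or.inr ⟨rfl, List.mem_cons_of_mem _ h2, h3⟩
      · rintro (h1 | ⟨rfl, h2, h3⟩)
        · exact Or.inl h1
        · rcases List.mem_cons.mp h2 with rfl | h2
          · exact absurd h3 h
          · exact Or.inr ⟨rfl, h2, h3⟩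

-- the outer fold
theorem pv_outer_mem (lands l1 : List (Int × Int))
    (d : PySem.Dict (Int × Int) (List (Int × Int))) (e n : Int × Int) :
    n ∈ ((l1.foldl (fun d p1 =>
          lands.foldl (fun d p2 => if pvAdj p1 p2 then d.modify p1 [] (· ++ [p2]) else d) d) d).getD e [])
      ↔ n ∈ d.getD e [] ∨ (e ∈ l1 ∧ n ∈ lands ∧ pvAdj e n = true) := by
  induction l1 generalizing d with
  | nil => simp
  | cons a t ih =>
    simp only [List.foldl_cons]
    rw [ih, pv_inner_mem]
    constructor
    · rintro ((h1 | ⟨rfl, h2, h3⟩) | ⟨h1, h2, h3⟩)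
      · exact Or.inl h1
      · exact Or.inr ⟨List.mem_cons_self, h2, h3⟩
      · exact Or.inr ⟨List.mem_cons_of_mem _ h1, h2, h3⟩
    · rintro (h1 | ⟨h1, h2, h3⟩)
      · exact Or.inl (Or.inl h1)
      · rcases List.mem_cons.mp h1 with rfl | h1
        · exact Or.inl (Or.inr ⟨rfl, h2, h3⟩)
        · exact Or.inr ⟨h1, h2, h3⟩

theorem pv_adj_mem (lands : List (Int × Int)) (e n : Int × Int) :
    n ∈ (build_adjacency_list lands).getD e []
      ↔ e ∈ lands ∧ n ∈ lands ∧ pvAdj e n = true := by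
  unfold build_adjacency_list
  rw [pv_outer_mem]
  simp [PySem.Dict.getD_empty]

-- A's inner break loop is an existence test
theorem pv_innerScan_iff (adj : PySem.Dict (Int × Int) (List (Int × Int))) (n : Int × Int)
    (l : List (Int × Int)) :
    pvInnerScan adj n l = true ↔ ∃ e ∈ l, n ∈ adj.getD e [] := by
  induction l with
  | nil => simp [pvInnerScan]
  | cons a t ih =>
    simp only [pvInnerScan]
    by_cases h : (adj.getD a []).contains n
    · simp_all
    · rw [if_neg h, ih]
      simp only [List.contains_iff_mem] at h
      simp [h]

-- a point is in e's four-neighbor list iff A's adjacency test accepts the pair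
theorem pv_neighbors_iff (a n : Int × Int) :
    n ∈ [(a.1 + 1, a.2), (a.1 - 1, a.2), (a.1, a.2 + 1), (a.1, a.2 - 1)]
      ↔ pvAdj a n = true := by
  obtain ⟨ax, ay⟩ := a
  obtain ⟨nx, ny⟩ := n
  simp [pvAdj, Prod.ext_iff]
  omega

-- B's frontier: membership
theorem pv_frontier_mem (existing : List (Int × Int)) (s : PySem.Set (Int × Int)) (n : Int × Int) :
    n ∈ existing.foldl (fun s e =>
        PySem.Set.update s [(e.1 + 1, e.2), (e.1 - 1, e.2), (e.1, e.2 + 1), (e.1, e.2 - 1)]) s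
      ↔ n ∈ s ∨ ∃ e ∈ existing, pvAdj e n = true := by
  induction existing generalizing s with
  | nil => simp
  | cons a t ih =>
    simp only [List.foldl_cons]
    rw [ih, PySem.Set.mem_update, pv_neighbors_iff]
    constructor
    · rintro ((h1 | h2) | ⟨e, he, h3⟩)
      · exact Or.inl h1
      · exact Or.inr ⟨a, List.mem_cons_self, h2⟩
      · exact Or.inr ⟨e, List.mem_cons_of_mem _ he, h3⟩
    · rintro (h1 | ⟨e, he, h3⟩)
      · exact Or.inl (Or.inl h1)
      · rcases List.mem_cons.mp he with rfl | he
        · exact Or.inl (Or.inr h3)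
        · exact Or.inr ⟨e, he, h3⟩

-- ===== VERDICT (by name: the statement is the Claim_ definition above) =====
theorem find_new_neighbors_spec : Claim_equal_find_new_neighbors := by
  intro existing new _
  unfold Spec_find_new_neighbors find_new_neighbors find_new_neighbors_alt
  rw [PySem.List.foldl_append_if_eq_filter]
  simp only [List.nil_append]
  apply List.filter_congr
  intro n hn
  rw [Bool.eq_iff_iff, pv_innerScan_iff, PySem.Set.contains_iff, pv_frontier_mem]
  simp only [PySem.Set.empty, List.not_mem_nil, false_or]
  constructor
  · rintro ⟨e, he, hm⟩
    rw [pv_adj_mem] at hm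
    exact ⟨e, he, hm.2.2⟩
  · rintro ⟨e, he, hadj⟩
    exact ⟨e, he, (pv_adj_mem _ _ _).mpr ⟨List.mem_append_left _ he, List.mem_append_right _ hn, hadj⟩⟩
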